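-- pv_equiv track=rewrite | github.com/7metachain/leetcode_proj | 49字母异位词分组/group_anagrams.py | _parse_strs
-- ===== SOURCE A (Python) =====
-- def _parse_strs(line: str) -> list[str]:
--     """解析一行输入为字符串列表，兼容多种格式"""
--     # 去掉外层括号、引号，按逗号或空格分割
--     cleaned = (
--         line.replace("[", " ")
--         .replace("]", " ")
--         .replace('"', " ")
--         .replace("'", " ")
--         .replace(",", " ")
--     )
--     return [tok.strip() for tok in cleaned.split() if tok.strip()]
-- ===== SOURCE B (Python) =====
-- def _parse_strs(line: str) -> list[str]:
--     """Single left-to-right scan: delimiter/whitespace chars end the current token."""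
--     seps = {'[', ']', '"', "'", ','}
--     out = []
--     buf = ""
--     for ch in line:
--         if ch in seps or ch.isspace():
--             if buf:
--                 out.append(buf)
--                 buf = ""
--         else:
--             buf += ch
--     if buf:
--         out.append(buf)
--     return out
-- ===== Notes on version B (the rewrite author's own statement) =====
-- stated objective: alternative
-- what changed: Replaces the five-pass replace-chain plus split/strip/filter with a single left-to-right character scan that maintains a token buffer and flushes it at delimiter or whitespace characters.
import Mathlib
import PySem

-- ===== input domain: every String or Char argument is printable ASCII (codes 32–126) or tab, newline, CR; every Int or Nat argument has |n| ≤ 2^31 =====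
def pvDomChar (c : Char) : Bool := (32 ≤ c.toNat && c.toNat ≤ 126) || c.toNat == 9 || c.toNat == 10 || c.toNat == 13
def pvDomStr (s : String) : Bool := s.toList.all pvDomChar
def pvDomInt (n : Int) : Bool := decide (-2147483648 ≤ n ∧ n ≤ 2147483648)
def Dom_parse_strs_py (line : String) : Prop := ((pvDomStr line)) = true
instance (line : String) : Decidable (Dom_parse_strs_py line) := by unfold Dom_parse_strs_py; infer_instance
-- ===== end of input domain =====

-- B replaces A's five-pass replace-chain + split/strip/filter with a single character scan flushing a token buffer at delimiter/whitespace chars (objective: alternative decomposition).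

-- ===== PORT A =====
def parse_strs_py (line : String) : List String :=
  let cleaned :=
    PySem.Str.replace (PySem.Str.replace (PySem.Str.replace (PySem.Str.replace
      (PySem.Str.replace line "[" " ") "]" " ") "\"" " ") "'" " ") "," " "
  ((PySem.Str.split₀ cleaned).filter (fun tok => PySem.Str.strip tok != "")).map
    (fun tok => PySem.Str.strip tok)

-- ===== PORT B =====
def pvSep (c : Char) : Bool :=
  ['[', ']', '"', '\'', ','].contains c || PySem.Chars.isspace c

def pvScanGo : List Char → List Char → List String
  | [], buf => if buf.isEmpty then [] else [String.ofList buf]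
  | c :: rest, buf =>
    if pvSep c then
      (if buf.isEmpty then pvScanGo rest [] else String.ofList buf :: pvScanGo rest [])
    else pvScanGo rest (buf ++ [c])

def parse_strs_py_alt (line : String) : List String := pvScanGo line.toList []

-- ===== PRECONDITION & SPEC =====
def Spec_parse_strs_py (line : String) (out : List String) : Prop := out = parse_strs_py_alt line
instance (line : String) (out : List String) : Decidable (Spec_parse_strs_py line out) := by unfold Spec_parse_strs_py; infer_instance

-- ===== CLAIM (what is proved, stated in full; the proofs are below) =====
def Claim_equal_parse_strs_py : Prop := ∀ (line : String), Dom_parse_strs_py line → Spec_parse_strs_py line (parse_strs_py line)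

-- ===== LEMMAS AND PROOFS =====

/-- The combined effect of A's replace chain on one character. -/
def pvG (c : Char) : Char := if ['[', ']', '"', '\'', ','].contains c then ' ' else c

theorem pv_replace_single (a : Char) :
    ∀ (s acc : List Char) (fuel : Nat), s.length ≤ fuel →
      PySem.Chars.replace.go [a] [' '] fuel s acc
        = acc.reverse ++ s.map (fun c => if c == a then ' ' else c) := by
  intro s
  induction s with
  | nil =>
    intro acc fuel _
    cases fuel <;> simp [PySem.Chars.replace.go]
  | cons c t ih =>
    intro acc fuel h
    cases fuel with
    | zero => simp at h
    | succ f =>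
      simp only [PySem.Chars.replace.go, List.isPrefixOf, List.map]
      have ht : t.length ≤ f := by simpa using h
      by_cases hc : a = c
      · subst hc
        simp [ih (' ' :: acc) f ht]
      · have h1 : (a == c) = false := by simp [hc]
        have h2 : (c == a) = false := by simp [Ne.symm hc]
        simp [h1, h2, ih (c :: acc) f ht]

theorem pv_replace_single' (a : Char) (s : List Char) :
    PySem.Chars.replace s [a] [' '] = s.map (fun c => if c == a then ' ' else c) := by
  simpa [PySem.Chars.replace] using pv_replace_single a s [] s.length (le_refl _)

theorem pv_cleaned (line : String) :
    (PySem.Str.replace (PySem.Str.replace (PySem.Str.replace (PySem.Str.replace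
      (PySem.Str.replace line "[" " ") "]" " ") "\"" " ") "'" " ") "," " ").toList
      = line.toList.map pvG := by
  simp only [PySem.Str.toList_replace]
  show PySem.Chars.replace (PySem.Chars.replace (PySem.Chars.replace (PySem.Chars.replace
      (PySem.Chars.replace line.toList ['['] [' ']) [']'] [' ']) ['"'] [' ']) ['\''] [' ']) [','] [' ']
      = line.toList.map pvG
  simp only [pv_replace_single', List.map_map]
  refine List.map_congr_left ?_
  intro c _
  simp only [Function.comp]
  by_cases h1 : c = '['
  · subst h1; decide
  by_cases h2 : c = ']'
  · subst h2; decide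
  by_cases h3 : c = '"'
  · subst h3; decide
  by_cases h4 : c = '\''
  · subst h4; decide
  by_cases h5 : c = ','
  · subst h5; decide
  have e1 : (c == '[') = false := by simp [h1]
  have e2 : (c == ']') = false := by simp [h2]
  have e3 : (c == '"') = false := by simp [h3]
  have e4 : (c == '\'') = false := by simp [h4]
  have e5 : (c == ',') = false := by simp [h5]
  have hcon : (['[', ']', '"', '\'', ','].contains c) = false := by
    simp [h1, h2, h3, h4, h5]
  have hg : pvG c = c := by unfold pvG; rw [hcon]; simp
  rw [hg]
  simp [e1, e2, e3, e4, e5]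

theorem pv_isspace_g (c : Char) : PySem.Chars.isspace (pvG c) = pvSep c := by
  by_cases h1 : c = '['
  · subst h1; decide
  by_cases h2 : c = ']'
  · subst h2; decide
  by_cases h3 : c = '"'
  · subst h3; decide
  by_cases h4 : c = '\''
  · subst h4; decide
  by_cases h5 : c = ','
  · subst h5; decide
  have hcon : (['[', ']', '"', '\'', ','].contains c) = false := by
    simp [h1, h2, h3, h4, h5]
  unfold pvG pvSep
  rw [hcon]
  simp

theorem pv_g_eq_self (c : Char) (h : pvSep c = false) : pvG c = c := by
  unfold pvSep at h
  rw [Bool.or_eq_false_iff] at h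
  unfold pvG
  rw [h.1]
  simp

theorem pv_scan (cs : List Char) :
    ∀ (cur : List Char) (acc : List (List Char)),
    List.map String.ofList (PySem.Chars.split₀.go (cs.map pvG) cur acc)
      = (acc.reverse.map String.ofList) ++ pvScanGo cs cur.reverse := by
  induction cs with
  | nil =>
    intro cur acc
    by_cases h : cur = []
    · subst h; simp [PySem.Chars.split₀.go, pvScanGo]
    · have h1 : cur.isEmpty = false := by simp [h]
      have h2 : cur.reverse.isEmpty = false := by simp [h]
      simp [PySem.Chars.split₀.go, pvScanGo, h1, h2]
  | cons c rest ih =>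
    intro cur acc
    simp only [List.map_cons, PySem.Chars.split₀.go, pv_isspace_g, pvScanGo]
    by_cases hs : pvSep c
    · simp only [hs, if_true]
      by_cases he : cur = []
      · subst he; simp [ih]
      · have h1 : cur.isEmpty = false := by simp [he]
        have h2 : cur.reverse.isEmpty = false := by simp [he]
        simp [h1, h2, ih]
    · simp only [hs, if_false, Bool.false_eq_true]
      rw [pv_g_eq_self c (by simpa using hs), ih (c :: cur) acc]
      simp

theorem pv_dropWhile_clean (l : List Char) (h : ∀ c ∈ l, PySem.Chars.isspace c = false) :
    List.dropWhile PySem.Chars.isspace l = l := by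
  cases l with
  | nil => simp
  | cons c t => simp [h c (by simp)]

theorem pv_strip_clean (t : List Char) (h : ∀ c ∈ t, PySem.Chars.isspace c = false) :
    PySem.Chars.strip t = t := by
  unfold PySem.Chars.strip PySem.Chars.lstrip PySem.Chars.rstrip
  rw [pv_dropWhile_clean t h]
  rw [pv_dropWhile_clean t.reverse (by intro c hc; exact h c (by simpa using hc))]
  simp

theorem pv_tokens_clean (cs : List Char) :
    ∀ (cur : List Char) (acc : List (List Char)),
    (∀ c ∈ cur, PySem.Chars.isspace c = false) →
    (∀ t ∈ acc, t ≠ [] ∧ ∀ c ∈ t, PySem.Chars.isspace c = false) →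
    ∀ t ∈ PySem.Chars.split₀.go cs cur acc,
      t ≠ [] ∧ ∀ c ∈ t, PySem.Chars.isspace c = false := by
  induction cs with
  | nil =>
    intro cur acc hcur hacc t ht
    by_cases he : cur = []
    · subst he
      simp [PySem.Chars.split₀.go] at ht
      exact hacc t ht
    · have h1 : cur.isEmpty = false := by simp [he]
      simp [PySem.Chars.split₀.go, h1] at ht
      rcases ht with h | h
      · exact hacc t h
      · subst h
        refine ⟨by simpa using he, ?_⟩
        intro c hc; exact hcur c (by simpa using hc)
  | cons c rest ih =>
    intro cur acc hcur hacc t ht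
    simp only [PySem.Chars.split₀.go] at ht
    by_cases hs : PySem.Chars.isspace c
    · simp only [hs, if_true] at ht
      by_cases he : cur = []
      · subst he
        exact ih [] acc (by simp) hacc t (by simpa using ht)
      · have h1 : cur.isEmpty = false := by simp [he]
        refine ih [] (cur.reverse :: acc) (by simp) ?_ t (by simpa [h1] using ht)
        intro u hu
        rcases List.mem_cons.mp hu with h | h
        · subst h
          refine ⟨by simpa using he, ?_⟩
          intro d hd; exact hcur d (by simpa using hd)
        · exact hacc u h
    · simp only [hs, if_false, Bool.false_eq_true] at ht
      refine ih (c :: cur) acc ?_ hacc t ht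
      intro d hd
      rcases List.mem_cons.mp hd with h | h
      · subst h; simpa using hs
      · exact hcur d h

-- ===== VERDICT (by name: the statement is the Claim_ definition above) =====
theorem parse_strs_py_spec : Claim_equal_parse_strs_py := by
  intro line _
  unfold Spec_parse_strs_py
  show parse_strs_py line = parse_strs_py_alt line
  have hstep : parse_strs_py line =
      ((PySem.Str.split₀ (PySem.Str.replace (PySem.Str.replace (PySem.Str.replace
        (PySem.Str.replace (PySem.Str.replace line "[" " ") "]" " ") "\"" " ") "'" " ")
        "," " ")).filter (fun tok => PySem.Str.strip tok != "")).map
        (fun tok => PySem.Str.strip tok) := rfl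
  rw [hstep]
  unfold parse_strs_py_alt
  have hclean := pv_cleaned line
  set cleaned := PySem.Str.replace (PySem.Str.replace (PySem.Str.replace (PySem.Str.replace
      (PySem.Str.replace line "[" " ") "]" " ") "\"" " ") "'" " ") "," " " with hc
  have hsplit : PySem.Str.split₀ cleaned
      = List.map String.ofList (PySem.Chars.split₀ (line.toList.map pvG)) := by
    simp [PySem.Str.split₀, hclean]
  have htok : ∀ tok ∈ PySem.Str.split₀ cleaned,
      PySem.Str.strip tok = tok ∧ tok ≠ "" := by
    intro tok hmem
    rw [hsplit] at hmem
    rcases List.mem_map.mp hmem with ⟨t, ht, rfl⟩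
    have hprop := pv_tokens_clean (line.toList.map pvG) [] []
      (by simp) (by simp) t (by simpa [PySem.Chars.split₀] using ht)
    constructor
    · simp [PySem.Str.strip, String.toList_ofList, pv_strip_clean t hprop.2]
    · intro he
      exact hprop.1 (by simpa using congrArg String.toList he)
  have hfil : (PySem.Str.split₀ cleaned).filter (fun tok => PySem.Str.strip tok != "")
      = PySem.Str.split₀ cleaned := by
    refine List.filter_eq_self.mpr ?_
    intro tok hmem
    rcases htok tok hmem with ⟨hstrip, hne⟩
    rw [hstrip]
    simpa using hne
  rw [hfil]
  have hmapid : (PySem.Str.split₀ cleaned).map (fun tok => PySem.Str.strip tok)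
      = PySem.Str.split₀ cleaned := by
    rw [List.map_congr_left (fun tok hmem => (htok tok hmem).1)]
    simp
  rw [hmapid, hsplit]
  simpa [PySem.Chars.split₀] using pv_scan line.toList [] []
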